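-- pv_equiv track=rewrite | github.com/dichevk/Graph-Isomorphism | main.py | checkDicts
-- ===== SOURCE A (Python) =====
-- def checkDicts(gdict, hdict) -> bool:
--     for i in gdict:
--         if i not in hdict or not len(gdict[i]) == len(hdict[i]):
--             return False
--     for i in hdict:
--         if i not in gdict or not len(gdict[i]) == len(hdict[i]):
--             return False
--     return True
-- ===== SOURCE B (Python) =====
-- def checkDicts(gdict, hdict) -> bool:
--     def sig(d):
--         return sorted(((k, len(v)) for k, v in d.items()), key=lambda kv: kv[0])
--     return sig(gdict) == sig(hdict)
-- ===== Notes on version B (the rewrite author's own statement) =====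
-- stated objective: alternative
-- what changed: Replaces A's two membership-and-length loops by computing a canonical sorted (key, value-length) signature of each dict and comparing the two signatures for equality.
import Mathlib
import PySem

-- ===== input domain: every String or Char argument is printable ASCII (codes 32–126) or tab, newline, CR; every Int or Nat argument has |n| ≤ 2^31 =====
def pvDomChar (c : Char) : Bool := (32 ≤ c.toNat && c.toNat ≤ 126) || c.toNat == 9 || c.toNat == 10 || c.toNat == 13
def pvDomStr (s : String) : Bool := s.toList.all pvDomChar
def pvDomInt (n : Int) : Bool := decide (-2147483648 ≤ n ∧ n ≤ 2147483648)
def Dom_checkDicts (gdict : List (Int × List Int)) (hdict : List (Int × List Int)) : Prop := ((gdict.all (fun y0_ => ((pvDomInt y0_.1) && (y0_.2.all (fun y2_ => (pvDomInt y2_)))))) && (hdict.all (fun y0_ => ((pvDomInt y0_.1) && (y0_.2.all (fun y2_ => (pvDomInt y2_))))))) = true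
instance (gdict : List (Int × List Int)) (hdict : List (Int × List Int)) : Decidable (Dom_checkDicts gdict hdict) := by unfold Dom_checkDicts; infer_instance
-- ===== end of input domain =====

-- B replaces A's two membership-and-length loops by a canonical-form comparison: each dict is
-- reduced to its sorted (key, value-length) signature and the two signatures are compared.
-- ===== PORT A =====
def checkDicts (gdict : List (Int × List Int)) (hdict : List (Int × List Int)) : Bool :=
  (gdict.all fun p =>
    (PySem.Dict.mk hdict).contains p.1 &&
      (((PySem.Dict.mk gdict).getD p.1 []).length == ((PySem.Dict.mk hdict).getD p.1 []).length)) &&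
  (hdict.all fun p =>
    (PySem.Dict.mk gdict).contains p.1 &&
      (((PySem.Dict.mk gdict).getD p.1 []).length == ((PySem.Dict.mk hdict).getD p.1 []).length))

-- ===== PORT B =====
-- Source B's sig: the (key, len(value)) pairs of d, sorted by key
def checkDictsSig (d : List (Int × List Int)) : List (Int × Int) :=
  PySem.List.sorted (d.map fun p => (p.1, (p.2.length : Int))) (fun kv => kv.1) false

def checkDicts_alt (gdict : List (Int × List Int)) (hdict : List (Int × List Int)) : Bool :=
  checkDictsSig gdict == checkDictsSig hdict

-- ===== PRECONDITION & SPEC =====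
-- Pre_ excludes association lists with a duplicated key: those never arise from a Python dict
-- (a dict's keys are unique), so the Python inputs of A are fully covered.
def Pre_checkDicts (gdict : List (Int × List Int)) (hdict : List (Int × List Int)) : Prop :=
  (gdict.map Prod.fst).Nodup ∧ (hdict.map Prod.fst).Nodup
instance (gdict : List (Int × List Int)) (hdict : List (Int × List Int)) : Decidable (Pre_checkDicts gdict hdict) := by unfold Pre_checkDicts; infer_instance
def pvWitness_checkDicts : (List (Int × List Int)) × (List (Int × List Int)) :=
  ([(1, [2]), (3, [])], [(3, []), (1, [5])])

def Spec_checkDicts (gdict : List (Int × List Int)) (hdict : List (Int × List Int)) (out : Bool) : Prop := out = checkDicts_alt gdict hdict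
instance (gdict : List (Int × List Int)) (hdict : List (Int × List Int)) (out : Bool) : Decidable (Spec_checkDicts gdict hdict out) := by unfold Spec_checkDicts; infer_instance

-- ===== CLAIM (what is proved, stated in full; the proofs are below) =====
def Claim_equal_checkDicts : Prop := ∀ (gdict : List (Int × List Int)) (hdict : List (Int × List Int)), Dom_checkDicts gdict hdict → Pre_checkDicts gdict hdict → Spec_checkDicts gdict hdict (checkDicts gdict hdict)

-- ===== LEMMAS AND PROOFS =====

-- Under unique keys, lookup of a member key returns that member's value.
theorem getD_mk_of_mem {d : List (Int × List Int)} {k : Int} {v : List Int}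
    (hnd : (d.map Prod.fst).Nodup) (hm : (k, v) ∈ d) :
    (PySem.Dict.mk d).getD k [] = v := by
  induction d with
  | nil => cases hm
  | cons p rest ih =>
    obtain ⟨a, b⟩ := p
    simp only [List.map_cons, List.nodup_cons] at hnd
    rcases List.mem_cons.mp hm with h | h
    · rw [Prod.mk.injEq] at h
      obtain ⟨rfl, rfl⟩ := h
      simp [PySem.Dict.getD, PySem.Dict.get?_mk_cons]
    · have hne : (a == k) = false := by
        rw [beq_eq_false_iff_ne]
        intro he
        exact hnd.1 (by rw [he]; exact List.mem_map.mpr ⟨(k, v), h, rfl⟩)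
      have := ih hnd.2 h
      simp only [PySem.Dict.getD] at this ⊢
      rw [PySem.Dict.get?_mk_cons, hne]
      exact this
      
-- Two lists of pairs with duplicate-free first components have equal key-sorted forms
-- iff they contain the same pairs.
theorem sorted_eq_iff_same_mem (l1 l2 : List (Int × Int))
    (h1 : (l1.map Prod.fst).Nodup) (h2 : (l2.map Prod.fst).Nodup) :
    (PySem.List.sorted l1 (fun kv => kv.1) false = PySem.List.sorted l2 (fun kv => kv.1) false)
      ↔ ∀ p, p ∈ l1 ↔ p ∈ l2 := by
  constructor
  · intro he p
    have hp1 := PySem.List.sorted_perm (xs := l1) (key := fun kv => kv.1) false 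
    have hp2 := PySem.List.sorted_perm (xs := l2) (key := fun kv => kv.1) false 
    rw [← hp1.mem_iff, ← hp2.mem_iff, he]
  · intro hmem
    have hperm : l1.Perm l2 :=
      (List.perm_ext_iff_of_nodup (h1.of_map) (h2.of_map)).mpr hmem
    have hp1 := PySem.List.sorted_perm (xs := l1) (key := fun kv => kv.1) false 
    have hle := PySem.List.sorted_pairwise (xs := l1) (key := fun kv => kv.1)
    have hndmap : ((PySem.List.sorted l1 (fun kv => kv.1) false).map Prod.fst).Nodup :=
      (hp1.map Prod.fst).nodup_iff.mpr h1
    have hne : (PySem.List.sorted l1 (fun kv => kv.1) false).Pairwise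
        (fun a b => a.1 ≠ b.1) := by
      rw [List.nodup_iff_pairwise_ne, List.pairwise_map] at hndmap
      exact hndmap
    have hlt : (PySem.List.sorted l1 (fun kv => kv.1) false).Pairwise
        (fun a b => a.1 < b.1) :=
      (hle.and hne).imp fun h => lt_of_le_of_ne h.1 h.2
    exact (PySem.List.sorted_eq_of_perm_of_pairwise_lt l2 _ (fun kv => kv.1) (hp1.trans hperm) hlt).symm

-- (k, n) is in d's signature list iff some entry (k, v) of d has length n.
theorem mem_sig_list {d : List (Int × List Int)} {k n : Int} :
    (k, n) ∈ d.map (fun p => (p.1, (p.2.length : Int))) ↔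
      ∃ v, (k, v) ∈ d ∧ (v.length : Int) = n := by
  constructor
  · intro h
    rcases List.mem_map.mp h with ⟨p, hp, he⟩
    obtain ⟨h1, h2⟩ := Prod.mk.injEq .. ▸ he
    exact ⟨p.2, by rw [← h1]; exact hp, h2⟩
  · rintro ⟨v, hv, rfl⟩
    exact List.mem_map.mpr ⟨(k, v), hv, rfl⟩

-- ===== VERDICT (by name: the statement is the Claim_ definition above) =====
theorem checkDicts_spec : Claim_equal_checkDicts := by
  intro g h _ hpre
  obtain ⟨hg, hh⟩ := hpre
  show checkDicts g h = checkDicts_alt g h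
  rw [Bool.eq_iff_iff]
  simp only [checkDicts, checkDicts_alt, checkDictsSig, Bool.and_eq_true, List.all_eq_true,
    PySem.Dict.contains_mk, beq_iff_eq, List.any_eq_true]
  rw [sorted_eq_iff_same_mem _ _ (by simpa [Function.comp_def] using hg)
      (by simpa [Function.comp_def] using hh)]
  constructor
  · rintro ⟨hgl, hhl⟩ ⟨k, n⟩
    rw [mem_sig_list, mem_sig_list]
    constructor
    · rintro ⟨v, hv, rfl⟩
      obtain ⟨⟨k', w⟩, hw, hk'⟩ := (hgl (k, v) hv).1
      simp only at hk'; rw [hk'] at hw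
      refine ⟨w, hw, ?_⟩
      have := (hgl (k, v) hv).2
      rw [getD_mk_of_mem hg hv, getD_mk_of_mem hh hw] at this
      exact_mod_cast this.symm
    · rintro ⟨v, hv, rfl⟩
      obtain ⟨⟨k', w⟩, hw, hk'⟩ := (hhl (k, v) hv).1
      simp only at hk'; rw [hk'] at hw
      refine ⟨w, hw, ?_⟩
      have := (hhl (k, v) hv).2
      rw [getD_mk_of_mem hg hw, getD_mk_of_mem hh hv] at this
      exact_mod_cast this
  · intro hmem
    constructor
    · rintro ⟨k, v⟩ hv
      have := (hmem (k, (v.length : Int))).1 (mem_sig_list.mpr ⟨v, hv, rfl⟩)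
      obtain ⟨w, hw, hlw⟩ := mem_sig_list.mp this
      refine ⟨⟨(k, w), hw, rfl⟩, ?_⟩
      rw [getD_mk_of_mem hg hv, getD_mk_of_mem hh hw]
      exact_mod_cast hlw.symm
    · rintro ⟨k, v⟩ hv
      have := (hmem (k, (v.length : Int))).2 (mem_sig_list.mpr ⟨v, hv, rfl⟩)
      obtain ⟨w, hw, hlw⟩ := mem_sig_list.mp this
      refine ⟨⟨(k, w), hw, rfl⟩, ?_⟩
      rw [getD_mk_of_mem hg hw, getD_mk_of_mem hh hv]
      exact_mod_cast hlw
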